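-- pv_equiv track=rewrite | github.com/nikitazigman/beaver | dataset/algorithms/classic_algorithms/intervals_distribution/src/main.py | intervals_distribution
-- ===== SOURCE A (Python) =====
-- from heapq import heapify, heappop
--
-- def intervals_distribution(intervals):
--     if len(intervals) <= 1:
--         return [intervals[:]]
--     intervals_queue = [(interval[0], interval) for interval in intervals]
--     heapify(intervals_queue)
--     interval_groups = [[heappop(intervals_queue)[1]]]
--     while intervals_queue:
--         current_interval = heappop(intervals_queue)[1]
--         for group in interval_groups:
--             if current_interval[0] >= group[-1][1]:
--                 group.append(current_interval)
--                 break
--         else: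
--             interval_groups.append([current_interval])
--     return interval_groups
-- ===== SOURCE B (Python) =====
-- def intervals_distribution(intervals):
--     # Group-major peeling: sort once, then repeatedly peel the greedy chain
--     # of mutually non-overlapping intervals off the front of what remains.
--     remaining = sorted(intervals)
--     groups = []
--     while remaining:
--         chain = [remaining[0]]
--         rest = []
--         for interval in remaining[1:]:
--             if interval[0] >= chain[-1][1]:
--                 chain.append(interval)
--             else:
--                 rest.append(interval)
--         groups.append(chain)
--         remaining = rest
--     return groups
-- ===== Notes on version B (the rewrite author's own statement) =====
-- stated objective: alternative
-- what changed: A pops intervals off a heap and places each one interval-major into the first fitting group by scanning the group list; B sorts once and works group-major, repeatedly peeling the greedy non-overlapping chain off the front of the remaining intervals, so the data is traversed in a different order with a proof that the order does not matter.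
-- intended difference: On the empty input A returns [[]] (one group holding no interval, an artefact of its len<=1 shortcut) while B returns [] (no groups), which is the intended distribution of zero intervals. — e.g. on intervals_distribution([]): A returns [[]], B returns []
-- outside the precondition, e.g. on intervals_distribution([[0, 5], [1]]): A returns [[[0, 5]], [[1]]], B returns [[[0, 5]], [[1]]]; on intervals_distribution([[0], [1, 2]]): A raises IndexError, B raises IndexError
import Mathlib
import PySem

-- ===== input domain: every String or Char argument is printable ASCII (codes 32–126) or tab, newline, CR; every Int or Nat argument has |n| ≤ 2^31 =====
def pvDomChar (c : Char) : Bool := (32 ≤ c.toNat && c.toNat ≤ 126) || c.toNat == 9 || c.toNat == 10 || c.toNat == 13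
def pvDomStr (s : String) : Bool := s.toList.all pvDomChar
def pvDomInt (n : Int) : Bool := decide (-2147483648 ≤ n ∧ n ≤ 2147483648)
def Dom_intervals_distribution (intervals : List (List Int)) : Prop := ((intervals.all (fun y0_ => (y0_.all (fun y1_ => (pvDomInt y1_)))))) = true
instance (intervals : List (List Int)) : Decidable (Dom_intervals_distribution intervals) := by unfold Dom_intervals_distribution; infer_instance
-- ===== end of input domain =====

-- B replaces A's heap + interval-major first-fit by sort-once + group-major greedy chain
-- peeling (objective: alternative traversal order, same asymptotic cost); on the empty
-- input B returns [] where A returns [[]] (see D_ below).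


-- ===== PORT A =====
-- Python's comparison of the tuples (interval[0], interval): lexicographic, exact
-- (Lean's < on List Int is Python's list comparison).
def pyLtPair (a b : Int × List Int) : Bool :=
  decide (a.1 < b.1) || (decide (a.1 = b.1) && decide (a.2 < b.2))

-- the minimal element of x :: xs under pyLtPair (first one on ties — ties are equal values)
def selMin (x : Int × List Int) (xs : List (Int × List Int)) : Int × List Int :=
  xs.foldl (fun m y => if pyLtPair y m then y else m) x

-- needed by extractAll's termination proof
theorem selMin_mem : ∀ (xs : List (Int × List Int)) (x : Int × List Int), selMin x xs ∈ x :: xs := by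
  intro xs
  induction xs with
  | nil => intro x; simp [selMin]
  | cons y ys ih =>
    intro x
    have hsel : selMin x (y :: ys) = selMin (if pyLtPair y x then y else x) ys := by
      simp [selMin]
    by_cases hc : pyLtPair y x = true
    · rw [hsel, if_pos hc]
      rcases List.mem_cons.mp (ih y) with h | h <;> simp [h]
    · rw [hsel, if_neg hc]
      rcases List.mem_cons.mp (ih x) with h | h <;> simp [h]

-- heapify + the heappop loop, ported as repeated extraction of the minimal tuple:
-- heapq pops tuples in nondecreasing tuple order, and tuples with equal keys are
-- equal values here, so this is value-exact for A's pop sequence.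
def extractAll : List (Int × List Int) → List (Int × List Int)
  | [] => []
  | x :: xs => selMin x xs :: extractAll ((x :: xs).erase (selMin x xs))
termination_by l => l.length
decreasing_by
  have hm := selMin_mem xs x
  rw [List.length_erase_of_mem hm]; simp

-- A's inner for/else over interval_groups: append to the first fitting group, else a new group
def ffStep : List (List (List Int)) → List Int → List (List (List Int))
  | [], cur => [[cur]]
  | g :: gs, cur =>
    if PySem.List.pyGetD cur 0 0 ≥ PySem.List.pyGetD (PySem.List.pyGetD g (-1) []) 1 0
    then (g ++ [cur]) :: gs
    else g :: ffStep gs cur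

def intervals_distribution (intervals : List (List Int)) : List (List (List Int)) :=
  if intervals.length ≤ 1 then [intervals]
  else
    let queue := intervals.map (fun interval => (PySem.List.pyGetD interval 0 0, interval))
    match extractAll queue with
    | [] => []
    | first :: rest => rest.foldl (fun groups p => ffStep groups p.2) [[first.2]]

-- ===== PORT B =====
-- one pass of B's inner for-loop: extend the chain greedily, collect the rest in order
def chainSplit (chain rest : List (List Int)) : List (List Int) → List (List Int) × List (List Int)
  | [] => (chain, rest)
  | interval :: tl =>
    if PySem.List.pyGetD interval 0 0 ≥ PySem.List.pyGetD (PySem.List.pyGetD chain (-1) []) 1 0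
    then chainSplit (chain ++ [interval]) rest tl
    else chainSplit chain (rest ++ [interval]) tl

-- B's while-loop: peel one greedy chain at a time (the fuel, the length of the list,
-- bounds the number of rounds; chainSplit_rest_length shows it never runs out)
def peel : Nat → List (List Int) → List (List (List Int))
  | _, [] => []
  | 0, _ :: _ => []
  | fuel + 1, x :: xs => (chainSplit [x] [] xs).1 :: peel fuel (chainSplit [x] [] xs).2

def intervals_distribution_alt (intervals : List (List Int)) : List (List (List Int)) :=
  peel (PySem.List.sorted intervals (fun x => x) false).length
    (PySem.List.sorted intervals (fun x => x) false)

-- ===== PRECONDITION & SPEC =====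
-- Pre_ restricts to well-formed intervals (≥ 2 endpoints) when there is more than one
-- interval: on shorter inner lists A raises IndexError or returns by accident of its
-- first-fit placement order (B behaves the same on every such input we cite).
def Pre_intervals_distribution (intervals : List (List Int)) : Prop :=
  intervals.length ≤ 1 ∨ ∀ iv ∈ intervals, 2 ≤ iv.length
instance (intervals : List (List Int)) : Decidable (Pre_intervals_distribution intervals) := by
  unfold Pre_intervals_distribution; infer_instance

def pvWitness_intervals_distribution : List (List Int) := [[1, 3], [2, 4], [0, 1]]

-- On the empty input A returns [[]] (one group holding no interval, an artefact of its
-- len<=1 shortcut) while B returns [] (no groups), the intended distribution of zero intervals.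
def D_intervals_distribution (intervals : List (List Int)) : Prop := intervals = []
instance (intervals : List (List Int)) : Decidable (D_intervals_distribution intervals) := by
  unfold D_intervals_distribution; infer_instance

def Spec_intervals_distribution (intervals : List (List Int)) (out : List (List (List Int))) : Prop :=
  ¬ D_intervals_distribution intervals → out = intervals_distribution_alt intervals
instance (intervals : List (List Int)) (out : List (List (List Int))) : Decidable (Spec_intervals_distribution intervals out) := by
  unfold Spec_intervals_distribution; infer_instance

def pvDiffWitness_intervals_distribution : List (List Int) := []
def pvDiffWitnessOut_intervals_distribution : (List (List (List Int))) × (List (List (List Int))) := ([[]], [])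

-- ===== CLAIM (what is proved, stated in full; the proofs are below) =====
def Claim_unchanged_intervals_distribution : Prop := ∀ (intervals : List (List Int)), Dom_intervals_distribution intervals → Pre_intervals_distribution intervals → Spec_intervals_distribution intervals (intervals_distribution intervals)
def Claim_changed_intervals_distribution : Prop := Dom_intervals_distribution (pvDiffWitness_intervals_distribution) ∧ Pre_intervals_distribution (pvDiffWitness_intervals_distribution) ∧ D_intervals_distribution (pvDiffWitness_intervals_distribution) ∧ intervals_distribution (pvDiffWitness_intervals_distribution) = pvDiffWitnessOut_intervals_distribution.1 ∧ intervals_distribution_alt (pvDiffWitness_intervals_distribution) = pvDiffWitnessOut_intervals_distribution.2 ∧ pvDiffWitnessOut_intervals_distribution.1 ≠ pvDiffWitnessOut_intervals_distribution.2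
def Claim_exact_intervals_distribution : Prop := ∀ (intervals : List (List Int)), Dom_intervals_distribution intervals → Pre_intervals_distribution intervals → D_intervals_distribution intervals → intervals_distribution intervals ≠ intervals_distribution_alt intervals

-- ===== LEMMAS AND PROOFS =====

theorem pyLtPair_iff (a b : Int × List Int) :
    pyLtPair a b = true ↔ a.1 < b.1 ∨ (a.1 = b.1 ∧ a.2 < b.2) := by
  simp [pyLtPair]

theorem pyLtPair_trans {a b c : Int × List Int}
    (h1 : pyLtPair a b = true) (h2 : pyLtPair b c = true) : pyLtPair a c = true := by
  rw [pyLtPair_iff] at *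
  rcases h1 with h1 | ⟨e1, h1⟩ <;> rcases h2 with h2 | ⟨e2, h2⟩
  · exact Or.inl (lt_trans h1 h2)
  · exact Or.inl (e2 ▸ h1)
  · exact Or.inl (e1 ▸ h2)
  · exact Or.inr ⟨e1.trans e2, lt_trans h1 h2⟩

theorem pyLtPair_le_lt {a b c : Int × List Int}
    (h1 : pyLtPair b a = false) (h2 : pyLtPair b c = true) : pyLtPair a c = true := by
  have h1' : ¬ (b.1 < a.1 ∨ (b.1 = a.1 ∧ b.2 < a.2)) := by
    rw [← pyLtPair_iff]; simp [h1]
  push_neg at h1'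
  rw [pyLtPair_iff] at h2 ⊢
  rcases h2 with h2 | ⟨e2, h2⟩
  · exact Or.inl (lt_of_le_of_lt h1'.1 h2)
  · rcases lt_or_eq_of_le h1'.1 with h | h
    · exact Or.inl (e2 ▸ h)
    · exact Or.inr ⟨h.trans e2, lt_of_le_of_lt (h1'.2 h.symm) h2⟩

theorem selMin_min : ∀ (xs : List (Int × List Int)) (x z : Int × List Int),
    z ∈ x :: xs → pyLtPair z (selMin x xs) = false := by
  intro xs
  induction xs with
  | nil =>
    intro x z hz
    simp at hz; subst hz
    simp [selMin, pyLtPair]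
  | cons y ys ih =>
    intro x z hz
    have hsel : selMin x (y :: ys) = selMin (if pyLtPair y x then y else x) ys := by
      simp [selMin]
    rw [hsel]
    set x' := if pyLtPair y x then y else x with hx'
    by_cases hzy : z ∈ x' :: ys
    · exact ih x' z hzy
    · -- z is the element of {x, y} not chosen as x'
      have hx'min := ih x' x' (List.mem_cons_self)
      rcases List.mem_cons.mp hz with rfl | hz2
      · -- z = x, so pyLtPair y x = true and x' = y
        have hyx : pyLtPair y z = true := by
          by_contra hf
        -- if pyLtPair y z were false, x' = z and z ∈ x' :: ys
          have : x' = z := by rw [hx']; simp [Bool.eq_false_iff.mpr hf]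
          exact hzy (this ▸ List.mem_cons_self)
        have hx'y : x' = y := by rw [hx']; simp [hyx]
        by_contra hf
        have hzm : pyLtPair z (selMin x' ys) = true := by
          cases h : pyLtPair z (selMin x' ys) <;> simp_all
        rw [hx'y] at hzm hx'min
        have := pyLtPair_trans hyx hzm
        simp [this] at hx'min
      · rcases List.mem_cons.mp hz2 with rfl | hz3
        · -- z = y, so pyLtPair y x = false and x' = x
          have hyx : pyLtPair z x = false := by
            by_contra hf
            have : pyLtPair z x = true := by cases h : pyLtPair z x <;> simp_all
            have : x' = z := by rw [hx']; simp [this]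
            exact hzy (this ▸ List.mem_cons_self)
          have hx'x : x' = x := by rw [hx']; simp [hyx]
          by_contra hf
          have hzm : pyLtPair z (selMin x' ys) = true := by
            cases h : pyLtPair z (selMin x' ys) <;> simp_all
          rw [hx'x] at hzm hx'min
          have := pyLtPair_le_lt hyx hzm
          simp [this] at hx'min
        · exact absurd (List.mem_cons_of_mem x' hz3) hzy

theorem extractAll_perm : ∀ (l : List (Int × List Int)), (extractAll l).Perm l := by
  intro l
  induction l using extractAll.induct with
  | case1 => simp [extractAll]
  | case2 x xs ih =>
    rw [extractAll]
    exact (List.Perm.cons _ ih).trans (List.perm_cons_erase (selMin_mem xs x)).symm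

theorem extractAll_pairwise : ∀ (l : List (Int × List Int)),
    (extractAll l).Pairwise (fun a b => pyLtPair b a = false) := by
  intro l
  induction l using extractAll.induct with
  | case1 => simp [extractAll]
  | case2 x xs ih =>
    rw [extractAll]
    refine List.Pairwise.cons (fun b hb => ?_) ih
    have hb1 : b ∈ (x :: xs).erase (selMin x xs) := (extractAll_perm _).mem_iff.mp hb
    exact selMin_min xs x b (List.erase_subset hb1)

-- the pop sequence of A's heap is exactly B's sorted list
theorem popped_sorted (intervals : List (List Int)) (hne : ∀ iv ∈ intervals, iv ≠ []) :
    PySem.List.sorted intervals (fun x => x) false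
      = (extractAll (intervals.map (fun interval => (PySem.List.pyGetD interval 0 0, interval)))).map Prod.snd := by
  set q := intervals.map (fun interval => (PySem.List.pyGetD interval 0 0, interval)) with hq
  have hqmem : ∀ p ∈ q, p.1 = PySem.List.pyGetD p.2 0 0 ∧ p.2 ∈ intervals := by
    intro p hp
    rw [hq] at hp
    rcases List.mem_map.mp hp with ⟨iv, hiv, rfl⟩
    exact ⟨rfl, hiv⟩
  have hperm : ((extractAll q).map Prod.snd).Perm intervals := by
    have h1 := (extractAll_perm q).map Prod.snd
    refine h1.trans ?_
    rw [hq, List.map_map]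
    have hid : Prod.snd ∘ (fun interval : List Int => (PySem.List.pyGetD interval 0 0, interval)) = id := rfl
    rw [hid, List.map_id]
  have hpw : ((extractAll q).map Prod.snd).Pairwise (· ≤ ·) := by
    rw [List.pairwise_map]
    refine List.Pairwise.imp_of_mem ?_ (extractAll_pairwise q)
    intro a b ha hb hab
    have haq : a ∈ q := (extractAll_perm q).subset ha
    have hbq : b ∈ q := (extractAll_perm q).subset hb
    obtain ⟨ha1, ha2⟩ := hqmem a haq
    obtain ⟨hb1, hb2⟩ := hqmem b hbq
    obtain ⟨ah, ta, hae⟩ : ∃ h t, a.2 = h :: t := by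
      cases hc : a.2 with
      | nil => exact absurd hc (hne a.2 ha2)
      | cons hd tl => exact ⟨hd, tl, rfl⟩
    obtain ⟨bh, tb, hbe⟩ : ∃ h t, b.2 = h :: t := by
      cases hc : b.2 with
      | nil => exact absurd hc (hne b.2 hb2)
      | cons hd tl => exact ⟨hd, tl, rfl⟩
    have ha1' : a.1 = ah := by rw [ha1, hae, PySem.List.pyGetD_zero_cons]
    have hb1' : b.1 = bh := by rw [hb1, hbe, PySem.List.pyGetD_zero_cons]
    have hnot : ¬ (b.1 < a.1 ∨ (b.1 = a.1 ∧ b.2 < a.2)) := by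
      rw [← pyLtPair_iff]; simp [hab]
    push_neg at hnot
    rcases lt_or_eq_of_le hnot.1 with h | h
    · -- a.1 < b.1, so the heads differ and a.2 < b.2 lexicographically
      rw [hae, hbe]
      exact le_of_lt (List.cons_lt_cons_iff.mpr (Or.inl (by rw [← ha1', ← hb1']; exact h)))
    · exact hnot.2 h.symm
  have := PySem.List.sorted_id_eq_of_perm_of_pairwise intervals ((extractAll q).map Prod.snd) hperm hpw
  convert this using 2

theorem chainSplit_rest_length : ∀ (todo chain rest : List (List Int)),
    (chainSplit chain rest todo).2.length ≤ rest.length + todo.length := by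
  intro todo
  induction todo with
  | nil => intro chain rest; simp [chainSplit]
  | cons x tl ih =>
    intro chain rest
    simp only [chainSplit]
    split
    · have := ih (chain ++ [x]) rest; simpa using Nat.le_trans this (by simp)
    · have := ih chain (rest ++ [x]); simp at this ⊢; omega

-- chainSplit's rest parameter is a pure accumulator
theorem chainSplit_acc : ∀ (todo chain rest : List (List Int)),
    chainSplit chain rest todo = ((chainSplit chain [] todo).1, rest ++ (chainSplit chain [] todo).2) := by
  intro todo
  induction todo with
  | nil => intro chain rest; simp [chainSplit]
  | cons x tl ih =>
    intro chain rest
    simp only [chainSplit, List.nil_append]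
    split
    · exact ih (chain ++ [x]) rest
    · rw [ih chain (rest ++ [x]), ih chain [x]]
      simp

-- interval-major first-fit over a group prefix = greedy chain for the first group,
-- then first-fit of what the chain rejected over the remaining groups
theorem ff_chain : ∀ (L : List (List Int)) (g : List (List Int)) (gs : List (List (List Int))),
    L.foldl ffStep (g :: gs)
      = (chainSplit g [] L).1 :: (chainSplit g [] L).2.foldl ffStep gs := by
  intro L
  induction L with
  | nil => intro g gs; simp [chainSplit]
  | cons x xs ih =>
    intro g gs
    simp only [List.foldl_cons, ffStep, chainSplit, List.nil_append]
    split
    · exact ih (g ++ [x]) gs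
    · rw [ih g (ffStep gs x), chainSplit_acc xs g [x]]
      simp

theorem ff_peel : ∀ (n : Nat) (L : List (List Int)), L.length ≤ n → L.foldl ffStep [] = peel n L := by
  intro n
  induction n with
  | zero =>
    intro L hL
    match L, hL with
    | [], _ => simp [peel]
  | succ n ih =>
    intro L hL
    match L with
    | [] => simp [peel]
    | x :: xs =>
      rw [peel]
      have h0 : (x :: xs).foldl ffStep [] = xs.foldl ffStep [[x]] := by simp [ffStep]
      rw [h0, ff_chain xs [x] []]
      have hlen := chainSplit_rest_length xs [x] []
      rw [ih (chainSplit [x] [] xs).2 (by simp at hL hlen ⊢; omega)]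

-- ===== VERDICT (by name: the statement is the Claim_ definition above) =====
theorem intervals_distribution_spec : Claim_unchanged_intervals_distribution := by
  intro intervals _hdom hpre hnd
  unfold D_intervals_distribution at hnd
  unfold intervals_distribution intervals_distribution_alt
  by_cases hlen : intervals.length ≤ 1
  · rw [if_pos hlen]
    match intervals, hnd with
    | [], hnd => exact absurd rfl hnd
    | [iv], _ =>
      have hs : PySem.List.sorted [iv] (fun x => x) false = [iv] := by
        have h1 := PySem.List.sorted_eq_self_of_pairwise [iv] (fun x : List Int => x) (by simp)
        convert h1 using 2
      rw [hs]
      simp [peel, chainSplit]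
    | a :: b :: t, _ => simp at hlen
  · rw [if_neg hlen]
    have hlen2 : 2 ≤ intervals.length := by omega
    have hne : ∀ iv ∈ intervals, iv ≠ [] := by
      rcases hpre with h | h
      · omega
      · intro iv hiv hn
        have := h iv hiv
        rw [hn] at this; simp at this
    set q := intervals.map (fun interval => (PySem.List.pyGetD interval 0 0, interval)) with hq
    have hsort := popped_sorted intervals hne
    have hqlen : 2 ≤ q.length := by rw [hq]; simpa using hlen2
    have helen : (extractAll q).length = q.length := (extractAll_perm q).length_eq
    obtain ⟨first, rest, hE⟩ : ∃ f r, extractAll q = f :: r := by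
      match hE2 : extractAll q with
      | [] => rw [hE2] at helen; simp at helen; omega
      | f :: r => exact ⟨f, r, rfl⟩
    rw [hE] at hsort
    simp only [hE]
    rw [hsort]
    have hfold : rest.foldl (fun groups p => ffStep groups p.2) [[first.2]]
        = (rest.map Prod.snd).foldl ffStep [[first.2]] := by
      rw [List.foldl_map]
    rw [hfold, List.map_cons]
    rw [← ff_peel (first.2 :: rest.map Prod.snd).length (first.2 :: rest.map Prod.snd) (le_refl _)]
    simp [ffStep]

theorem intervals_distribution_changed : Claim_changed_intervals_distribution := by
  unfold Claim_changed_intervals_distribution; decide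

theorem intervals_distribution_tight : Claim_exact_intervals_distribution := by
  intro intervals _hdom _hpre hd
  unfold D_intervals_distribution at hd
  subst hd
  decide
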